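-- pv_equiv track=rewrite | github.com/jihun-eu/algorithm-baekjoon | 백준/Bronze/8958. OX퀴즈/OX퀴즈.py | score_ox_quiz
-- ===== SOURCE A (Python) =====
-- def score_ox_quiz(answers: str) -> int:
--
--     score = 0
--     tmp = 0
--     for answer in answers:
--         if answer == "X": tmp = 0
--         else: tmp += 1
--         score += tmp
--     return score
-- ===== SOURCE B (Python) =====
-- def score_ox_quiz(answers: str) -> int:
--     return sum(len(run) * (len(run) + 1) // 2 for run in answers.split('X'))
-- ===== Notes on version B (the rewrite author's own statement) =====
-- stated objective: faster
-- what changed: Replaces the per-character running-streak accumulator with a split of the string on the wrong-answer character into maximal correct runs, summing the closed-form triangular number len*(len+1)//2 of each run.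
import Mathlib
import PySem

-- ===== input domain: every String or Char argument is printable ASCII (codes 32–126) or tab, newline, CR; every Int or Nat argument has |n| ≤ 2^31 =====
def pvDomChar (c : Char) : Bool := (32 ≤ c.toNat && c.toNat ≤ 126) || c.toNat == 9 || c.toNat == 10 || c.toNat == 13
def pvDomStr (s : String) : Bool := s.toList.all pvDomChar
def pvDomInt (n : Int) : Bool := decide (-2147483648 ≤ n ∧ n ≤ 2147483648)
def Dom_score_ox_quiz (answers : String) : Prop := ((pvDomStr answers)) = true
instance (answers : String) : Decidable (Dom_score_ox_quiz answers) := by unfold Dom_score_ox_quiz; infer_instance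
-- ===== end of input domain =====

-- B replaces A's per-character streak accumulator by splitting the string into maximal
-- non-'X' runs and summing the closed-form triangular number len*(len+1)//2 of each run.


-- ===== PORT A =====
def score_ox_quiz (answers : String) : Int :=
  (answers.toList.foldl
    (fun (st : Int × Int) answer =>
      let tmp : Int := if answer = 'X' then 0 else st.2 + 1
      (st.1 + tmp, tmp))
    (0, 0)).1

-- ===== PORT B =====
-- len(run)*(len(run)+1)//2 for one run (Python '//' = PySem.Int.floordiv)
def pvTriRun (run : List Char) : Int :=
  PySem.Int.floordiv ((run.length : Int) * ((run.length : Int) + 1)) 2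

-- answers.split('X') with a one-character separator is List.splitOn 'X' on the code points
def score_ox_quiz_alt (answers : String) : Int :=
  ((answers.toList.splitOn 'X').map pvTriRun).sum

-- ===== PRECONDITION & SPEC =====
def Spec_score_ox_quiz (answers : String) (out : Int) : Prop := out = score_ox_quiz_alt answers
instance (answers : String) (out : Int) : Decidable (Spec_score_ox_quiz answers out) := by unfold Spec_score_ox_quiz; infer_instance

-- ===== CLAIM (what is proved, stated in full; the proofs are below) =====
def Claim_equal_score_ox_quiz : Prop := ∀ (answers : String), Dom_score_ox_quiz answers → Spec_score_ox_quiz answers (score_ox_quiz answers)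

-- ===== LEMMAS AND PROOFS =====

-- B's total over a list of code points
def pvBsum (l : List Char) : Int := ((l.splitOn 'X').map pvTriRun).sum

-- length of the maximal non-'X' prefix
def pvLead (l : List Char) : Nat := (l.takeWhile (fun c => c != 'X')).length

lemma pvTri_natCast (n : Nat) :
    PySem.Int.floordiv ((n : Int) * ((n : Int) + 1)) 2 = ((n * (n + 1) / 2 : Nat) : Int) := by
  simp

lemma pvTri_succ (n : Nat) :
    PySem.Int.floordiv (((n + 1 : Nat) : Int) * (((n + 1 : Nat) : Int) + 1)) 2
      = PySem.Int.floordiv ((n : Int) * ((n : Int) + 1)) 2 + (n : Int) + 1 := by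
  rw [pvTri_natCast, pvTri_natCast]
  have h : (n + 1) * (n + 1 + 1) = n * (n + 1) + (n + 1) * 2 := by ring
  rw [h, Nat.add_mul_div_right _ _ (by norm_num : (0 : Nat) < 2)]
  push_cast
  ring

lemma pvSplitOn_head (l : List Char) :
    ∃ t, l.splitOn 'X' = (l.takeWhile (fun c => c != 'X')) :: t := by
  induction l with
  | nil => exact ⟨[], rfl⟩
  | cons c l ih =>
    obtain ⟨t, ht⟩ := ih
    by_cases hc : c = 'X'
    · subst hc
      exact ⟨l.splitOn 'X', by simp [List.splitOn, List.splitOnP_cons]⟩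
    · refine ⟨t, ?_⟩
      simp only [List.splitOn] at ht ⊢
      rw [List.splitOnP_cons, if_neg (by simpa using hc), ht]
      simp [hc]

lemma pvBsum_cons_X (l : List Char) : pvBsum ('X' :: l) = pvBsum l := by
  simp only [pvBsum, List.splitOn, List.splitOnP_cons]
  simp [pvTriRun]

lemma pvBsum_cons_ne (c : Char) (l : List Char) (hc : c ≠ 'X') :
    pvBsum (c :: l) = pvBsum l + (pvLead l : Int) + 1 := by
  obtain ⟨t, ht⟩ := pvSplitOn_head l
  simp only [pvBsum, pvLead, List.splitOn] at *
  rw [List.splitOnP_cons, if_neg (by simpa using hc), ht]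
  simp only [List.modifyHead_cons, List.map_cons, List.sum_cons]
  have hlen : (c :: l.takeWhile (fun c => c != 'X')).length
      = (l.takeWhile (fun c => c != 'X')).length + 1 := rfl
  simp only [pvTriRun, hlen]
  rw [pvTri_succ]
  ring

lemma pvLead_cons_X (l : List Char) : pvLead ('X' :: l) = 0 := by
  simp [pvLead]

lemma pvLead_cons_ne (c : Char) (l : List Char) (hc : c ≠ 'X') :
    pvLead (c :: l) = pvLead l + 1 := by
  simp [pvLead, hc]

lemma pvLoop_inv (l : List Char) (s t : Int) :
    (l.foldl
      (fun (st : Int × Int) answer =>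
        let tmp : Int := if answer = 'X' then 0 else st.2 + 1
        (st.1 + tmp, tmp))
      (s, t)).1 = s + pvBsum l + t * (pvLead l : Int) := by
  induction l generalizing s t with
  | nil => simp [pvBsum, pvLead, pvTriRun, List.splitOn]
  | cons c l ih =>
    by_cases hc : c = 'X'
    · subst hc
      simp only [List.foldl_cons]
      rw [ih]
      rw [pvBsum_cons_X, pvLead_cons_X]
      simp
    · simp only [List.foldl_cons, if_neg hc]
      rw [ih]
      rw [pvBsum_cons_ne c l hc, pvLead_cons_ne c l hc]
      push_cast
      ring

-- ===== VERDICT (by name: the statement is the Claim_ definition above) =====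
theorem score_ox_quiz_spec : Claim_equal_score_ox_quiz := by
  intro answers _
  show score_ox_quiz answers = score_ox_quiz_alt answers
  unfold score_ox_quiz score_ox_quiz_alt
  rw [pvLoop_inv]
  simp [pvBsum]
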